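-- pv_equiv track=rewrite | github.com/Kokanikhila07/ProteusIQ-Protein-Intelligence-Structural-Analysis | tools/structure.py | _extract_uniprot_ids
-- ===== SOURCE A (Python) =====
-- def _extract_uniprot_ids(blast_hits: list) -> list:
--     """
--     Extract UniProt accessions from BLAST hit list.
--
--     Returns:
--         List of unique UniProt accessions.
--     """
--     uniprot_ids = []
--     seen = set()
--
--     for hit in (blast_hits or []):
--         # Try hit_id format: sp|P12345|NAME_SPECIES
--         hit_id = hit.get("hit_id", "")
--         parts = hit_id.split("|")
--         if len(parts) >= 2 and parts[0] in ("sp", "tr"):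
--             acc = parts[1]
--             if acc not in seen:
--                 uniprot_ids.append(acc)
--                 seen.add(acc)
--             continue
--
--         # Try accession field
--         acc = hit.get("accession", "")
--         if acc and acc not in seen:
--             uniprot_ids.append(acc)
--             seen.add(acc)
--
--     return uniprot_ids
-- ===== SOURCE B (Python) =====
-- def _candidate(hit):
--     parts = hit.get("hit_id", "").split("|")
--     if len(parts) >= 2 and parts[0] in ("sp", "tr"):
--         return parts[1]
--     return hit.get("accession", "") or None
--
--
-- def _extract_uniprot_ids(blast_hits: list) -> list:
--     # one extraction pass, then positional dedup: build a first-occurrence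
--     # index table by a reverse scan and keep each candidate only at its
--     # first-occurrence position
--     cands = [c for c in map(_candidate, blast_hits or []) if c is not None]
--     first = {}
--     for i, c in reversed(list(enumerate(cands))):
--         first[c] = i
--     return [c for i, c in enumerate(cands) if first[c] == i]
-- ===== Notes on version B (the rewrite author's own statement) =====
-- stated objective: alternative
-- what changed: Replaces A's single interleaved extract-and-dedup loop with a mutable seen set by a staged positional algorithm: one extraction pass yielding the candidate list, a first-occurrence index table built by a reverse enumerate scan, then a positional filter keeping each candidate only at its first-occurrence index.
import Mathlib
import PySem

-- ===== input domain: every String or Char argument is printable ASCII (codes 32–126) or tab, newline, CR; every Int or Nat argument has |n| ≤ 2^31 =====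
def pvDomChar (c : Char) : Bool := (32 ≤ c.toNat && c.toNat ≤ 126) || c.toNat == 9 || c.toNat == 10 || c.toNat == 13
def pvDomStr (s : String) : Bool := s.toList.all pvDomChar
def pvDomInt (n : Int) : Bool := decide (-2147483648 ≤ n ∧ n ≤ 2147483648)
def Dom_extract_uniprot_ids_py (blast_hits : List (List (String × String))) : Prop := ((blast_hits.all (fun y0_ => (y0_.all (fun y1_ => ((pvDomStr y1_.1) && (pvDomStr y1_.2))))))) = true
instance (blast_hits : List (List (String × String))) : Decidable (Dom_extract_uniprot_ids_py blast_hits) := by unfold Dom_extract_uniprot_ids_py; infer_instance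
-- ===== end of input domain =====

-- B replaces A's single interleaved extract-and-dedup loop with a mutable seen set by a
-- staged, positional algorithm: one extraction pass, then a first-occurrence index table
-- built by a reverse scan, then a positional filter keeping each candidate only at its
-- first-occurrence index; objective: alternative (same O(n) cost, no seen-set state).

-- ===== PORT A =====
-- one loop step of A: state is (uniprot_ids, seen)
def pvStepA (st : List String × PySem.Set String) (hit : List (String × String)) :
    List String × PySem.Set String :=
  let hit_id := PySem.Dict.getD (PySem.Dict.mk hit) "hit_id" ""
  let parts := (PySem.Str.split? hit_id "|").getD []  -- split? is some: sep "|" ≠ ""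
  if 2 ≤ parts.length ∧ (PySem.List.pyGetD parts 0 "" = "sp" ∨ PySem.List.pyGetD parts 0 "" = "tr") then
    let acc := PySem.List.pyGetD parts 1 ""
    if ¬ PySem.Set.contains st.2 acc then (st.1 ++ [acc], PySem.Set.add st.2 acc) else st
  else
    let acc := PySem.Dict.getD (PySem.Dict.mk hit) "accession" ""
    if acc ≠ "" ∧ ¬ PySem.Set.contains st.2 acc then (st.1 ++ [acc], PySem.Set.add st.2 acc) else st

def extract_uniprot_ids_py (blast_hits : List (List (String × String))) : List String :=
  (blast_hits.foldl pvStepA ([], PySem.Set.empty)).1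

-- ===== PORT B =====
-- B's _candidate helper: the optional accession a hit contributes
def pvCandidate (hit : List (String × String)) : Option String :=
  let parts := (PySem.Str.split? (PySem.Dict.getD (PySem.Dict.mk hit) "hit_id" "") "|").getD []
  if 2 ≤ parts.length ∧ (PySem.List.pyGetD parts 0 "" = "sp" ∨ PySem.List.pyGetD parts 0 "" = "tr") then
    some (PySem.List.pyGetD parts 1 "")
  else
    let acc := PySem.Dict.getD (PySem.Dict.mk hit) "accession" ""
    if acc ≠ "" then some acc else none

-- B's reverse scan: first[c] = i for i, c in reversed(list(enumerate(cands)))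
def pvFirstIdx (cands : List String) : PySem.Dict String Int :=
  ((PySem.List.enumerate cands 0).reverse).foldl (fun d p => PySem.Dict.insert d p.2 p.1) PySem.Dict.empty

def extract_uniprot_ids_py_alt (blast_hits : List (List (String × String))) : List String :=
  let cands := blast_hits.filterMap pvCandidate
  let first := pvFirstIdx cands
  ((PySem.List.enumerate cands 0).filter (fun p => PySem.Dict.getD first p.2 (-1) == p.1)).map (·.2)

-- ===== PRECONDITION & SPEC =====
def Spec_extract_uniprot_ids_py (blast_hits : List (List (String × String))) (out : List String) : Prop := out = extract_uniprot_ids_py_alt blast_hits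
instance (blast_hits : List (List (String × String))) (out : List String) : Decidable (Spec_extract_uniprot_ids_py blast_hits out) := by unfold Spec_extract_uniprot_ids_py; infer_instance

-- ===== CLAIM =====
def Claim_equal_extract_uniprot_ids_py : Prop := ∀ (blast_hits : List (List (String × String))), Dom_extract_uniprot_ids_py blast_hits → Spec_extract_uniprot_ids_py blast_hits (extract_uniprot_ids_py blast_hits)

-- ===== LEMMAS AND PROOFS =====

-- A's step from a diagonal state (l, l): adds the candidate (if any) with PySem.Set.add
theorem pvStepA_diag (l : PySem.Set String) (hit : List (String × String)) :
    pvStepA (l, l) hit =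
      match pvCandidate hit with
      | some a => (PySem.Set.add l a, PySem.Set.add l a)
      | none => (l, l) := by
  unfold pvStepA pvCandidate PySem.Set.add
  by_cases h1 : 2 ≤ ((PySem.Str.split? (PySem.Dict.getD (PySem.Dict.mk hit) "hit_id" "") "|").getD []).length ∧
      (PySem.List.pyGetD ((PySem.Str.split? (PySem.Dict.getD (PySem.Dict.mk hit) "hit_id" "") "|").getD []) 0 "" = "sp" ∨
       PySem.List.pyGetD ((PySem.Str.split? (PySem.Dict.getD (PySem.Dict.mk hit) "hit_id" "") "|").getD []) 0 "" = "tr") <;>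
    simp only [h1, if_neg, not_false_eq_true] <;>
    split_ifs <;> simp_all

-- A's loop from a diagonal state is Set.add-folding the candidates
theorem pvFoldA_diag (hits : List (List (String × String))) (l : PySem.Set String) :
    hits.foldl pvStepA (l, l) = ((hits.filterMap pvCandidate).foldl PySem.Set.add l,
                                 (hits.filterMap pvCandidate).foldl PySem.Set.add l) := by
  induction hits generalizing l with
  | nil => rfl
  | cons h t ih =>
    simp only [List.foldl_cons, List.filterMap_cons, pvStepA_diag]
    cases pvCandidate h with
    | none => exact ih l
    | some a => simpa using ih (PySem.Set.add l a)

-- the reverse-built dict maps each candidate to its FIRST index (offset s)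
theorem pvFirstIdx_get (l : List String) (s : Int) (c : String) :
    (((PySem.List.enumerate l s).reverse).foldl (fun d p => PySem.Dict.insert d p.2 p.1)
        PySem.Dict.empty).get? c
      = if c ∈ l then some (s + (List.idxOf c l : Int)) else none := by
  induction l generalizing s with
  | nil => simp [PySem.List.enumerate_nil, PySem.Dict.get?_empty]
  | cons x t ih =>
    rw [PySem.List.enumerate_cons]
    simp only [List.reverse_cons, List.foldl_append, List.foldl_cons, List.foldl_nil]
    by_cases h : c = x
    · subst h
      rw [PySem.Dict.get?_insert_self]
      simp
    · rw [PySem.Dict.get?_insert_of_ne _ _ h, ih (s + 1)]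
      by_cases hm : c ∈ t
      · simp only [hm, if_true, List.mem_cons, h, false_or]
        rw [List.idxOf_cons_ne _ (by exact fun e => h e.symm)]
        push_cast
        ring_nf
      · simp [hm, h]

-- Set.ofList commutes with filter
theorem pvOfList_filter (p : String → Bool) (l : List String) :
    PySem.Set.ofList (l.filter p) = (PySem.Set.ofList l).filter p := by
  induction l with
  | nil => rfl
  | cons x t ih =>
    rw [PySem.Set.ofList_cons, List.filter_cons]
    by_cases hp : p x
    · simp only [hp, if_true, PySem.Set.ofList_cons, ih, PySem.Set.discard,
        List.filter_filter, List.filter_cons]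
      congr 1
      exact List.filter_congr (fun a _ => by rw [Bool.and_comm])
    · simp only [hp, Bool.false_eq_true, if_false, List.filter_cons, PySem.Set.discard,
        List.filter_filter, ih]
      refine List.filter_congr (fun a _ => ?_)
      by_cases ha : p a
      · have : (a == x) = false := by
          simp only [beq_eq_false_iff_ne]
          intro e; rw [e] at ha; exact hp ha
        simp [ha, this]
      · simp [ha]

-- positional filter by first-occurrence index = ordered dedup (generalized over a prefix)
theorem pvFilter_dedup (suf : List String) (pre : List String) :
    ((PySem.List.enumerate suf (pre.length : Int)).filter
        (fun p => ((List.idxOf p.2 (pre ++ suf) : Int)) == p.1)).map (·.2)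
      = PySem.List.dedup (suf.filter (fun c => !(pre.contains c))) := by
  induction suf generalizing pre with
  | nil => simp [PySem.List.enumerate_nil, PySem.List.dedup]
  | cons x t ih =>
    have hassoc : pre ++ x :: t = (pre ++ [x]) ++ t := by simp
    have htail :
        ((PySem.List.enumerate t ((pre.length : Int) + 1)).filter
            (fun p => ((List.idxOf p.2 (pre ++ x :: t) : Int)) == p.1)).map (·.2)
          = PySem.List.dedup (t.filter (fun c => !((pre ++ [x]).contains c))) := by
      have := ih (pre ++ [x])
      rw [hassoc]
      simpa [add_comm] using this
    rw [PySem.List.enumerate_cons, List.filter_cons]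
    by_cases hx : x ∈ pre
    · have hidx : ((List.idxOf x (pre ++ x :: t) : Int)) ≠ (pre.length : Int) := by
        rw [List.idxOf_append, if_pos hx]
        have := List.idxOf_lt_length_of_mem (a := x) hx
        exact_mod_cast Nat.ne_of_lt this
      simp only [hidx, beq_iff_eq, if_false]
      rw [htail]
      have hfl : t.filter (fun c => !((pre ++ [x]).contains c))
          = t.filter (fun c => !(pre.contains c)) := by
        refine List.filter_congr (fun a _ => ?_)
        by_cases ha : a ∈ pre
        · simp [ha]
        · have : a ≠ x := fun e => ha (e ▸ hx)
          simp [ha, this]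
      rw [hfl]
      have hxb : pre.contains x = true := by simpa using hx
      simp only [List.filter_cons, hxb, Bool.not_true]
      rfl
    · have hidx : ((List.idxOf x (pre ++ x :: t) : Int)) = (pre.length : Int) := by
        rw [List.idxOf_append, if_neg hx]
        simp
      simp only [hidx, beq_self_eq_true, if_true, List.map_cons]
      rw [htail]
      have hxb : pre.contains x = false := by simpa using hx
      rw [List.filter_cons]
      simp only [hxb, Bool.not_false]
      rw [if_pos trivial]
      unfold PySem.List.dedup
      rw [PySem.Set.ofList_cons]
      congr 1
      rw [PySem.Set.discard, ← pvOfList_filter]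
      congr 1
      rw [List.filter_filter]
      refine List.filter_congr (fun a _ => ?_)
      by_cases ha : a ∈ pre
      · simp [ha]
      · by_cases he : a = x <;> simp [ha, he]

-- B computes the ordered dedup of the candidate list
theorem pvAlt_eq_dedup (blast_hits : List (List (String × String))) :
    extract_uniprot_ids_py_alt blast_hits
      = PySem.List.dedup (blast_hits.filterMap pvCandidate) := by
  show ((PySem.List.enumerate (blast_hits.filterMap pvCandidate) 0).filter
      (fun p => PySem.Dict.getD
          (((PySem.List.enumerate (blast_hits.filterMap pvCandidate) 0).reverse).foldl
            (fun d p => PySem.Dict.insert d p.2 p.1) PySem.Dict.empty) p.2 (-1) == p.1)).map (·.2)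
    = _
  set cands := blast_hits.filterMap pvCandidate with hc
  have hcongr :
      (PySem.List.enumerate cands 0).filter
          (fun p => PySem.Dict.getD
              (((PySem.List.enumerate cands 0).reverse).foldl
                (fun d p => PySem.Dict.insert d p.2 p.1) PySem.Dict.empty) p.2 (-1) == p.1)
        = (PySem.List.enumerate cands 0).filter
            (fun p => ((List.idxOf p.2 (([] : List String) ++ cands) : Int)) == p.1) := by
    refine List.filter_congr (fun p hp => ?_)
    have hmem : p.2 ∈ cands := by
      have := PySem.List.map_snd_enumerate (xs := cands) (s := 0)
      rw [← this]
      exact List.mem_map_of_mem hp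
    rw [PySem.Dict.getD_eq_get?_getD, pvFirstIdx_get, if_pos hmem]
    simp
  rw [hcongr]
  have := pvFilter_dedup cands []
  simp only [List.length_nil, Nat.cast_zero] at this
  rw [this]
  congr 1
  simp

-- ===== VERDICT =====
theorem extract_uniprot_ids_py_spec : Claim_equal_extract_uniprot_ids_py := by
  intro blast_hits _
  unfold Spec_extract_uniprot_ids_py extract_uniprot_ids_py
  rw [pvAlt_eq_dedup,
      show (([], PySem.Set.empty) : List String × PySem.Set String) = (PySem.Set.empty, PySem.Set.empty) from rfl,
      pvFoldA_diag]
  simp [PySem.List.dedup_eq_ofList, PySem.Set.ofList_eq_foldl]
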